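-- pv_equiv track=rewrite | github.com/Suibosama/osm-raster-topology | src/osm_raster_topology/rasterize.py | _count_fragmented_features
-- ===== SOURCE A (Python) =====
-- def _count_fragmented_features(feature_pixels: dict[int, set[tuple[int, int]]], clipped_features: set[int]) -> int:
--     fragmented = 0
--     for feature_id, pixels in feature_pixels.items():
--         if not pixels or feature_id in clipped_features:
--             continue
--         if _sparse_component_count(pixels) > 1:
--             fragmented += 1
--     return fragmented
--
-- def _sparse_component_count(pixels: set[tuple[int, int]]) -> int:
--     remaining = set(pixels)
--     components = 0
--     while remaining:
--         components += 1
--         stack = [remaining.pop()]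
--         while stack:
--             y, x = stack.pop()
--             for ny in range(y - 1, y + 2):
--                 for nx in range(x - 1, x + 2):
--                     if (ny, nx) == (y, x):
--                         continue
--                     if (ny, nx) in remaining:
--                         remaining.remove((ny, nx))
--                         stack.append((ny, nx))
--     return components
-- ===== SOURCE B (Python) =====
-- def _count_fragmented_features(feature_pixels: dict[int, set[tuple[int, int]]], clipped_features: set[int]) -> int:
--     fragmented = 0
--     for feature_id, pixels in feature_pixels.items():
--         if not pixels or feature_id in clipped_features:
--             continue
--         if not _is_connected(pixels):
--             fragmented += 1
--     return fragmented
--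
-- def _is_connected(pixels: set[tuple[int, int]]) -> bool:
--     # Grow the component of one seed to a fixpoint; connected iff it covers all pixels.
--     seen = {next(iter(pixels))}
--     while True:
--         grown = {q for q in pixels
--                  if q not in seen
--                  and any(abs(q[0] - p[0]) <= 1 and abs(q[1] - p[1]) <= 1 for p in seen)}
--         if not grown:
--             return len(seen) == len(pixels)
--         seen |= grown
-- ===== Notes on version B (the rewrite author's own statement) =====
-- stated objective: alternative
-- what changed: A counts connected components by repeatedly extracting whole components with a stack-based DFS that mutates a remaining-set; B never counts components: it tests connectivity directly by growing the seed's component to a fixpoint with whole-set expansion passes and comparing its size with the pixel count, incrementing when the feature is not connected.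
import Mathlib
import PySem

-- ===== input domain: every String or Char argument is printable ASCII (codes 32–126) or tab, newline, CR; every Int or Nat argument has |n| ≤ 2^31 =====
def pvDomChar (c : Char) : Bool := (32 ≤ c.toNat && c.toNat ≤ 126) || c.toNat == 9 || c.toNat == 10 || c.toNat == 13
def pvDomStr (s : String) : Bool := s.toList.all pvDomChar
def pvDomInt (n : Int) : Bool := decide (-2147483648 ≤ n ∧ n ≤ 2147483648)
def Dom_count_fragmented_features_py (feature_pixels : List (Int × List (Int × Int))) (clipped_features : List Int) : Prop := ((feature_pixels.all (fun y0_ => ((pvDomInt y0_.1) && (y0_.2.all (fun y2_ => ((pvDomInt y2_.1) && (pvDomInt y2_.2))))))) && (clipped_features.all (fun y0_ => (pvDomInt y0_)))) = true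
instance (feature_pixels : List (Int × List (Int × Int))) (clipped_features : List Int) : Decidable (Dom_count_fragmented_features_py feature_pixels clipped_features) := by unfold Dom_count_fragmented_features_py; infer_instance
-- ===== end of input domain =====

-- B replaces A's component counting (repeated DFS extraction) by a direct connectivity test
-- (grow one seed's component to a fixpoint, compare sizes); equivalence is about the return value only.

-- ===== PORT A =====
-- helpers used by the port's termination proofs (cited by name in decreasing_by)

-- the 8-neighbour window of (y,x), and the move-one-candidate step of A's inner scan
def pvNbrs (y x : Int) : List (Int × Int) :=
  [(y-1,x-1),(y-1,x),(y-1,x+1),(y,x-1),(y,x+1),(y+1,x-1),(y+1,x),(y+1,x+1)]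

def pvMove (st : List (Int × Int) × List (Int × Int)) (c : Int × Int) :
    List (Int × Int) × List (Int × Int) :=
  if c ∈ st.1 then (st.1.erase c, c :: st.2) else st

-- port of A's nested 'for ny in range(y-1,y+2): for nx in range(x-1,x+2)' neighbour scan;
-- 'remaining.remove' is List.erase (exact: the removal is guarded by the membership test)
def pvVisitA (y x : Int) (st : List (Int × Int) × List (Int × Int)) :
    List (Int × Int) × List (Int × Int) :=
  (PySem.List.pyRange (y - 1) (y + 2) 1).foldl (fun st ny =>
    (PySem.List.pyRange (x - 1) (x + 2) 1).foldl (fun st nx =>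
      if (ny, nx) = (y, x) then st
      else if (ny, nx) ∈ st.1 then (st.1.erase (ny, nx), (ny, nx) :: st.2) else st) st) st

lemma pvRange3 (a : Int) : PySem.List.pyRange (a - 1) (a + 2) 1 = [a - 1, a, a + 1] := by
  have h1 : a - 1 + 1 = a := by ring
  rw [PySem.List.pyRange_one_cons (by omega), h1, PySem.List.pyRange_one_cons (by omega),
      PySem.List.pyRange_one_cons (by omega), PySem.List.pyRange_one_eq_nil (by omega)]

lemma pvRow_off (ny x y : Int) (hne : ny ≠ y) (st : List (Int × Int) × List (Int × Int)) :
    (PySem.List.pyRange (x - 1) (x + 2) 1).foldl (fun st nx =>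
      if (ny, nx) = (y, x) then st
      else if (ny, nx) ∈ st.1 then (st.1.erase (ny, nx), (ny, nx) :: st.2) else st) st
    = pvMove (pvMove (pvMove st (ny, x - 1)) (ny, x)) (ny, x + 1) := by
  rw [pvRange3]
  simp only [List.foldl_cons, List.foldl_nil,
    show ((ny, x - 1) = ((y, x) : Int × Int)) ↔ False by simp only [Prod.mk.injEq, iff_false]; omega,
    show ((ny, x) = ((y, x) : Int × Int)) ↔ False by simp only [Prod.mk.injEq, iff_false]; omega,
    show ((ny, x + 1) = ((y, x) : Int × Int)) ↔ False by simp only [Prod.mk.injEq, iff_false]; omega,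
    if_false, pvMove]

lemma pvRow_center (x y : Int) (st : List (Int × Int) × List (Int × Int)) :
    (PySem.List.pyRange (x - 1) (x + 2) 1).foldl (fun st nx =>
      if (y, nx) = (y, x) then st
      else if (y, nx) ∈ st.1 then (st.1.erase (y, nx), (y, nx) :: st.2) else st) st
    = pvMove (pvMove st (y, x - 1)) (y, x + 1) := by
  rw [pvRange3]
  simp only [List.foldl_cons, List.foldl_nil,
    show ((y, x - 1) = ((y, x) : Int × Int)) ↔ False by simp only [Prod.mk.injEq, iff_false]; omega,
    show ((y, x + 1) = ((y, x) : Int × Int)) ↔ False by simp only [Prod.mk.injEq, iff_false]; omega,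
    if_false, if_true, pvMove]

lemma pvVisitA_eq_fold (y x : Int) (st : List (Int × Int) × List (Int × Int)) :
    pvVisitA y x st = (pvNbrs y x).foldl pvMove st := by
  unfold pvVisitA pvNbrs
  rw [pvRange3 y]
  simp only [List.foldl_cons, List.foldl_nil]
  rw [pvRow_off (y-1) x y (by omega), pvRow_center x y, pvRow_off (y+1) x y (by omega)]

lemma pvMove_sum (st : List (Int × Int) × List (Int × Int)) (c : Int × Int) :
    (pvMove st c).1.length + (pvMove st c).2.length ≤ st.1.length + st.2.length := by
  unfold pvMove
  split_ifs with h
  · have := List.length_erase_of_mem h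
    have : 1 ≤ st.1.length := List.length_pos_of_mem h
    simp_all
    omega
  · omega

lemma pvFoldMove_sum (C : List (Int × Int)) :
    ∀ st : List (Int × Int) × List (Int × Int),
      (C.foldl pvMove st).1.length + (C.foldl pvMove st).2.length ≤ st.1.length + st.2.length := by
  induction C with
  | nil => intro st; simp
  | cons c C ih =>
      intro st
      calc (C.foldl pvMove (pvMove st c)).1.length + (C.foldl pvMove (pvMove st c)).2.length
          ≤ (pvMove st c).1.length + (pvMove st c).2.length := by
            simpa using ih (pvMove st c)
        _ ≤ st.1.length + st.2.length := pvMove_sum st c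

lemma pvFoldMove_fst_len (C : List (Int × Int)) :
    ∀ st : List (Int × Int) × List (Int × Int),
      (C.foldl pvMove st).1.length ≤ st.1.length := by
  induction C with
  | nil => intro st; simp
  | cons c C ih =>
      intro st
      refine le_trans (by simpa using ih (pvMove st c)) ?_
      unfold pvMove; split_ifs <;> simp [List.length_erase_le]

-- port of A's inner 'while stack' DFS loop; state = (remaining, stack), stack top = head
def pvDfsA : List (Int × Int) → List (Int × Int) → List (Int × Int)
  | R, [] => R
  | R, t :: K =>
      pvDfsA (pvVisitA t.1 t.2 (R, K)).1 (pvVisitA t.1 t.2 (R, K)).2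
termination_by R K => R.length + K.length
decreasing_by
  have h := pvFoldMove_sum (pvNbrs t.1 t.2) (R, K)
  rw [← pvVisitA_eq_fold] at h
  simp at h ⊢
  omega

lemma pvDfsA_len (R K : List (Int × Int)) : (pvDfsA R K).length ≤ R.length := by
  fun_induction pvDfsA with
  | case1 R => simp
  | case2 R t K ih =>
      have h := pvFoldMove_fst_len (pvNbrs t.1 t.2) (R, K)
      rw [← pvVisitA_eq_fold] at h
      exact le_trans ih h

-- port of A's outer 'while remaining' loop; 'remaining.pop()' takes an element of the set
-- (ported as the head; the returned COUNT does not depend on which element is taken)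
def pvCountLoop : List (Int × Int) → Int → Int
  | [], c => c
  | s :: rest, c => pvCountLoop (pvDfsA rest [s]) (c + 1)
termination_by R _ => R.length
decreasing_by
  have := pvDfsA_len rest [s]
  simp at this ⊢
  omega

-- _sparse_component_count
def pvSparseCount (pixels : List (Int × Int)) : Int :=
  pvCountLoop (PySem.Set.ofList pixels) 0

-- _count_fragmented_features (port of A)
def count_fragmented_features_py (feature_pixels : List (Int × List (Int × Int))) (clipped_features : List Int) : Int :=
  feature_pixels.foldl (fun fragmented pr =>
    if pr.2 = [] ∨ pr.1 ∈ clipped_features then fragmented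
    else if 1 < pvSparseCount pr.2 then fragmented + 1 else fragmented) 0

-- ===== PORT B =====
def pvNear (q p : Int × Int) : Bool :=
  decide ((q.1 - p.1).natAbs ≤ 1) && decide ((q.2 - p.2).natAbs ≤ 1)

-- the set comprehension 'grown'
def pvGrown (pixels seen : List (Int × Int)) : List (Int × Int) :=
  pixels.filter (fun q => !(seen.contains q) && seen.any (fun p => pvNear q p))

-- the 'while True' fixpoint loop; fuel only makes it total (never exhausted for the fuel
-- pvIsConnected supplies — the grown set is nonempty on every recursive call)
def pvConnLoop (pixels : List (Int × Int)) : Nat → List (Int × Int) → Bool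
  | 0, seen => seen.length == pixels.length
  | fuel + 1, seen =>
      let grown := pvGrown pixels seen
      if grown.isEmpty then seen.length == pixels.length
      else pvConnLoop pixels fuel (seen ++ grown)

-- _is_connected; 'next(iter(pixels))' takes an element of the set (ported as the head; the
-- returned Bool does not depend on which); [] is unreachable (callers skip empty sets)
def pvIsConnected (pixels : List (Int × Int)) : Bool :=
  match pixels with
  | [] => true
  | s :: _ => pvConnLoop pixels (pixels.length + 1) [s]

-- _count_fragmented_features (port of B)
def count_fragmented_features_py_alt (feature_pixels : List (Int × List (Int × Int))) (clipped_features : List Int) : Int :=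
  feature_pixels.foldl (fun fragmented pr =>
    if pr.2 = [] ∨ pr.1 ∈ clipped_features then fragmented
    else if !(pvIsConnected pr.2) then fragmented + 1 else fragmented) 0

-- ===== PRECONDITION & SPEC =====
-- The pixel-list values of feature_pixels encode Python sets, so each holds distinct elements;
-- Pre_ states exactly that (lists with duplicated pixels are not encodings of any Python input).
def Pre_count_fragmented_features_py (feature_pixels : List (Int × List (Int × Int))) (clipped_features : List Int) : Prop :=
  ∀ pr ∈ feature_pixels, pr.2.Nodup

instance (feature_pixels : List (Int × List (Int × Int))) (clipped_features : List Int) : Decidable (Pre_count_fragmented_features_py feature_pixels clipped_features) := by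
  unfold Pre_count_fragmented_features_py; infer_instance

def pvWitness_count_fragmented_features_py : (List (Int × List (Int × Int))) × List Int :=
  ([(0, [(0,0),(2,2)]), (1, [(0,0),(1,1)]), (2, [])], [2, 5])

def Spec_count_fragmented_features_py (feature_pixels : List (Int × List (Int × Int))) (clipped_features : List Int) (out : Int) : Prop := out = count_fragmented_features_py_alt feature_pixels clipped_features
instance (feature_pixels : List (Int × List (Int × Int))) (clipped_features : List Int) (out : Int) : Decidable (Spec_count_fragmented_features_py feature_pixels clipped_features out) := by unfold Spec_count_fragmented_features_py; infer_instance

-- ===== CLAIM (what is proved, stated in full; the proofs are below) =====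
def Claim_equal_count_fragmented_features_py : Prop := ∀ (feature_pixels : List (Int × List (Int × Int))) (clipped_features : List Int), Dom_count_fragmented_features_py feature_pixels clipped_features → Pre_count_fragmented_features_py feature_pixels clipped_features → Spec_count_fragmented_features_py feature_pixels clipped_features (count_fragmented_features_py feature_pixels clipped_features)

-- ===== LEMMAS AND PROOFS =====

-- 8-adjacency and reachability inside the pixel set S (the seed's connected component)
def pvAdj (u v : Int × Int) : Prop :=
  u ≠ v ∧ (u.1 - v.1).natAbs ≤ 1 ∧ (u.2 - v.2).natAbs ≤ 1

def pvStep (S : List (Int × Int)) (u v : Int × Int) : Prop := v ∈ S ∧ pvAdj u v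

def pvReach (S : List (Int × Int)) (s q : Int × Int) : Prop :=
  Relation.ReflTransGen (pvStep S) s q

lemma pvMem_nbrs (y x : Int) (c : Int × Int) : c ∈ pvNbrs y x ↔ pvAdj (y, x) c := by
  obtain ⟨a, b⟩ := c
  simp only [pvNbrs, pvAdj, List.mem_cons, List.not_mem_nil, or_false,
    ne_eq, Prod.ext_iff, not_and]
  omega

lemma pvFoldMove_fst_mem (C : List (Int × Int)) :
    ∀ (st : List (Int × Int) × List (Int × Int)), st.1.Nodup → ∀ z,
      (z ∈ (C.foldl pvMove st).1 ↔ z ∈ st.1 ∧ z ∉ C) := by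
  induction C with
  | nil => intro st _ z; simp
  | cons c C ih =>
      intro st hnd z
      have hnd' : (pvMove st c).1.Nodup := by
        unfold pvMove; split_ifs <;> simp [List.Nodup.erase, hnd]
      rw [List.foldl_cons, ih (pvMove st c) hnd' z]
      have hfst : ∀ w, w ∈ (pvMove st c).1 ↔ w ∈ st.1 ∧ w ≠ c := by
        intro w
        unfold pvMove
        split_ifs with h
        · rw [show ((st.1.erase c, c :: st.2).1) = st.1.erase c from rfl,
              hnd.mem_erase_iff]
          tauto
        · constructor
          · intro hw; exact ⟨hw, by rintro rfl; exact h hw⟩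
          · exact fun hw => hw.1
      rw [hfst]
      simp only [List.mem_cons]
      tauto

lemma pvFoldMove_fst_nodup (C : List (Int × Int)) :
    ∀ (st : List (Int × Int) × List (Int × Int)), st.1.Nodup →
      (C.foldl pvMove st).1.Nodup := by
  induction C with
  | nil => intro st h; simpa
  | cons c C ih =>
      intro st h
      rw [List.foldl_cons]
      exact ih (pvMove st c) (by unfold pvMove; split_ifs <;> simp [List.Nodup.erase, h])

lemma pvFoldMove_snd_mem (C : List (Int × Int)) :
    ∀ (st : List (Int × Int) × List (Int × Int)), st.1.Nodup → ∀ z,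
      (z ∈ (C.foldl pvMove st).2 ↔ z ∈ st.2 ∨ (z ∈ st.1 ∧ z ∈ C)) := by
  induction C with
  | nil => intro st _ z; simp
  | cons c C ih =>
      intro st hnd z
      have hnd' : (pvMove st c).1.Nodup := by
        unfold pvMove; split_ifs <;> simp [List.Nodup.erase, hnd]
      rw [List.foldl_cons, ih (pvMove st c) hnd' z]
      have hfst : ∀ w, w ∈ (pvMove st c).1 ↔ w ∈ st.1 ∧ w ≠ c := by
        intro w
        unfold pvMove
        split_ifs with h
        · rw [show ((st.1.erase c, c :: st.2).1) = st.1.erase c from rfl,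
              hnd.mem_erase_iff]
          tauto
        · constructor
          · intro hw; exact ⟨hw, by rintro rfl; exact h hw⟩
          · exact fun hw => hw.1
      have hsnd : ∀ w, w ∈ (pvMove st c).2 ↔ w ∈ st.2 ∨ (w ∈ st.1 ∧ w = c) := by
        intro w
        unfold pvMove
        split_ifs with h
        · simp only [List.mem_cons]
          constructor
          · rintro (rfl | hw)
            · exact Or.inr ⟨h, rfl⟩
            · exact Or.inl hw
          · rintro (hw | ⟨_, rfl⟩)
            · exact Or.inr hw
            · exact Or.inl rfl
        · constructor
          · exact Or.inl
          · rintro (hw | ⟨hw, rfl⟩)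
            · exact hw
            · exact absurd hw h
      rw [hfst, hsnd]
      simp only [List.mem_cons]
      tauto

lemma pvRTG_last_mem {R : List (Int × Int)} {u p : Int × Int}
    (h : Relation.ReflTransGen (pvStep R) u p) : p = u ∨ p ∈ R := by
  induction h with
  | refl => exact Or.inl rfl
  | tail _ hstep _ => exact Or.inr hstep.1

-- the DFS worklist invariant: pvDfsA removes from 'remaining' exactly the pixels reachable
-- from the seed, and removes only reachable ones
lemma pvDfsA_spec (S : List (Int × Int)) (s : Int × Int) :
    ∀ (R K : List (Int × Int)), R.Nodup →
      (∀ q ∈ S, q ∈ R ∨ pvReach S s q) →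
      (∀ t ∈ K, pvReach S s t) →
      (∀ t ∈ K, t ∉ R) →
      (R ⊆ S) →
      (∀ q ∈ R, pvReach S s q → ∃ t ∈ K, Relation.ReflTransGen (pvStep R) t q) →
      (∀ q ∈ S, q ∈ pvDfsA R K ∨ pvReach S s q) ∧ (∀ q ∈ pvDfsA R K, ¬ pvReach S s q) := by
  intro R K
  fun_induction pvDfsA R K with
  | case1 R =>
      intro _ h0 _ _ _ h3
      refine ⟨h0, fun q hq hr => ?_⟩
      obtain ⟨t, ht, _⟩ := h3 q hq hr
      exact absurd ht (List.not_mem_nil)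
  | case2 R t K ih =>
      intro hnd h0 h1 h4 h2 h3
      rw [pvVisitA_eq_fold] at ih ⊢
      set C := pvNbrs t.1 t.2 with hC
      set st := C.foldl pvMove (R, K) with hst
      have hfst : ∀ z, z ∈ st.1 ↔ z ∈ R ∧ z ∉ C := pvFoldMove_fst_mem C (R, K) hnd
      have hsnd : ∀ z, z ∈ st.2 ↔ z ∈ K ∨ (z ∈ R ∧ z ∈ C) := pvFoldMove_snd_mem C (R, K) hnd
      have hCadj : ∀ c, c ∈ C ↔ pvAdj t c := by
        intro c; rw [hC, pvMem_nbrs]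
      have hreacht : pvReach S s t := h1 t (List.mem_cons_self)
      -- reachability of moved pixels
      have hmoved : ∀ z, z ∈ R → z ∈ C → pvReach S s z := fun z hzR hzC =>
        hreacht.tail ⟨h2 hzR, (hCadj z).1 hzC⟩
      apply ih
      · exact pvFoldMove_fst_nodup C (R, K) hnd
      · intro q hq
        rcases h0 q hq with hqR | hr
        · by_cases hqC : q ∈ C
          · exact Or.inr (hmoved q hqR hqC)
          · exact Or.inl ((hfst q).2 ⟨hqR, hqC⟩)
        · exact Or.inr hr
      · intro u hu
        rcases (hsnd u).1 hu with huK | ⟨huR, huC⟩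
        · exact h1 u (List.mem_cons_of_mem _ huK)
        · exact hmoved u huR huC
      · intro u hu hu1
        rcases (hsnd u).1 hu with huK | ⟨_, huC⟩
        · exact h4 u (List.mem_cons_of_mem _ huK) ((hfst u).1 hu1).1
        · exact ((hfst u).1 hu1).2 huC
      · intro z hz; exact h2 ((hfst z).1 hz).1
      · -- re-establish the path invariant by induction along the old path
        intro q hq hr
        obtain ⟨u, hu, hpath⟩ := h3 q ((hfst q).1 hq).1 hr
        have key : ∀ v, Relation.ReflTransGen (pvStep R) u v → v ∈ st.1 →
            ∃ w ∈ st.2, Relation.ReflTransGen (pvStep st.1) w v := by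
          intro v hv
          induction hv with
          | refl =>
              intro hu1
              exact absurd ((hfst u).1 hu1).1 (h4 u hu)
          | @tail p v' hup hpv ihp =>
              intro hv1
              by_cases hp1 : p ∈ st.1
              · obtain ⟨w, hw, hwp⟩ := ihp hp1
                exact ⟨w, hw, hwp.tail ⟨hv1, hpv.2⟩⟩
              · rcases pvRTG_last_mem hup with rfl | hpR
                · rcases List.mem_cons.1 hu with rfl | huK
                  · exact absurd ((hCadj v').2 hpv.2) ((hfst v').1 hv1).2
                  · exact ⟨p, (hsnd p).2 (Or.inl huK), Relation.ReflTransGen.single ⟨hv1, hpv.2⟩⟩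
                · have hpC : p ∈ C := by
                    by_contra hpC
                    exact hp1 ((hfst p).2 ⟨hpR, hpC⟩)
                  exact ⟨p, (hsnd p).2 (Or.inr ⟨hpR, hpC⟩), Relation.ReflTransGen.single ⟨hv1, hpv.2⟩⟩
        exact key q hpath hq

lemma pvDfsA_subset (R K : List (Int × Int)) : pvDfsA R K ⊆ R := by
  fun_induction pvDfsA with
  | case1 R => exact fun _ h => h
  | case2 R t K ih =>
      refine fun z hz => ?_
      have hz' := ih hz
      rw [pvVisitA_eq_fold] at hz'
      -- fold only erases from the first component
      have : ∀ (C : List (Int × Int)) (st : List (Int × Int) × List (Int × Int)),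
          (C.foldl pvMove st).1 ⊆ st.1 := by
        intro C
        induction C with
        | nil => intro st w hw; simpa using hw
        | cons c C ihc =>
            intro st w hw
            have := ihc (pvMove st c) hw
            unfold pvMove at this
            split_ifs at this
            · exact List.mem_of_mem_erase this
            · exact this
      exact this _ _ hz'

lemma pvCountLoop_ge (R : List (Int × Int)) (c : Int) : c ≤ pvCountLoop R c := by
  fun_induction pvCountLoop with
  | case1 c => exact le_refl c
  | case2 s rest c ih => omega

-- path from s within S restricted to rest = S \ {s}
lemma pvReach_restrict (S rest : List (Int × Int)) (s : Int × Int)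
    (hmem : ∀ q, q ∈ S → q ≠ s → q ∈ rest) :
    ∀ q, pvReach S s q → q = s ∨ Relation.ReflTransGen (pvStep rest) s q := by
  intro q h
  induction h with
  | refl => exact Or.inl rfl
  | @tail p q hsp hpq ihp =>
      by_cases hq : q = s
      · exact Or.inl hq
      · have hqrest : q ∈ rest := hmem q hpq.1 hq
        rcases ihp with rfl | hpath
        · exact Or.inr (Relation.ReflTransGen.single ⟨hqrest, hpq.2⟩)
        · exact Or.inr (hpath.tail ⟨hqrest, hpq.2⟩)

-- A's component count exceeds 1 iff some pixel is unreachable from the first one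
lemma pvSparseCount_char (s : Int × Int) (rest : List (Int × Int))
    (hnd : (s :: rest).Nodup) :
    (1 < pvSparseCount (s :: rest) ↔ ¬ ∀ q ∈ s :: rest, pvReach (s :: rest) s q) := by
  have hofl : PySem.Set.ofList (s :: rest) = s :: rest := PySem.Set.ofList_eq_self_of_nodup _ hnd
  have hsnr : s ∉ rest := (List.nodup_cons.1 hnd).1
  have hndr : rest.Nodup := (List.nodup_cons.1 hnd).2
  set S := s :: rest with hS
  have hspec := pvDfsA_spec S s rest [s] hndr
    (by
      intro q hq
      rcases List.mem_cons.1 hq with rfl | hqr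
      · exact Or.inr Relation.ReflTransGen.refl
      · exact Or.inl hqr)
    (by
      intro t ht
      rcases List.mem_singleton.1 ht with rfl
      exact Relation.ReflTransGen.refl)
    (by
      intro t ht
      rcases List.mem_singleton.1 ht with rfl
      exact hsnr)
    (by intro z hz; exact List.mem_cons_of_mem _ hz)
    (by
      intro q hq hr
      rcases pvReach_restrict S rest s
        (by intro w hw hws; rcases List.mem_cons.1 hw with rfl | h
            · exact absurd rfl hws
            · exact h) q hr with rfl | hpath
      · exact absurd hq hsnr
      · exact ⟨s, List.mem_singleton.2 rfl, hpath⟩)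
  have hcount : pvSparseCount S = pvCountLoop (pvDfsA rest [s]) 1 := by
    unfold pvSparseCount
    rw [hS, hofl]
    show pvCountLoop (s :: rest) 0 = _
    simp only [pvCountLoop]
    norm_num
  constructor
  · intro hgt hall
    -- all reachable → dfs leaves nothing → count = 1
    have hempty : pvDfsA rest [s] = [] := by
      rcases h : pvDfsA rest [s] with _ | ⟨z, zs⟩
      · rfl
      · exfalso
        have hz : z ∈ pvDfsA rest [s] := h ▸ List.mem_cons_self
        have hzS : z ∈ S := List.mem_cons_of_mem _ (pvDfsA_subset rest [s] hz)
        exact hspec.2 z hz (hall z hzS)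
    rw [hcount, hempty] at hgt
    simp only [pvCountLoop] at hgt
    omega
  · intro hnall
    obtain ⟨q, hqS, hqnr⟩ : ∃ q ∈ S, ¬ pvReach S s q := by
      by_contra h
      push_neg at h
      exact hnall h
    have hqdfs : q ∈ pvDfsA rest [s] := by
      rcases hspec.1 q hqS with h | h
      · exact h
      · exact absurd h hqnr
    rcases h : pvDfsA rest [s] with _ | ⟨z, zs⟩
    · rw [h] at hqdfs; exact absurd hqdfs List.not_mem_nil
    · rw [hcount, h]
      simp only [pvCountLoop]
      have := pvCountLoop_ge (pvDfsA zs [z]) (1 + 1)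
      omega

-- ---- B side ----

lemma pvGrown_mem (pixels seen : List (Int × Int)) (q : Int × Int) :
    q ∈ pvGrown pixels seen ↔
      q ∈ pixels ∧ q ∉ seen ∧ ∃ p ∈ seen, pvNear q p = true := by
  unfold pvGrown
  simp [List.mem_filter]

lemma pvNear_of_adj {p q : Int × Int} (h : pvAdj p q) : pvNear q p = true := by
  unfold pvNear pvAdj at *
  obtain ⟨-, h1, h2⟩ := h
  simp only [Bool.and_eq_true, decide_eq_true_eq]
  omega

lemma pvAdj_of_near {p q : Int × Int} (h : pvNear q p = true) (hne : q ≠ p) : pvAdj p q := by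
  unfold pvNear at h
  simp only [Bool.and_eq_true, decide_eq_true_eq] at h
  exact ⟨Ne.symm hne, by omega, by omega⟩

lemma pvLen_le_of_nodup_subset {l₁ l₂ : List (Int × Int)} (h1 : l₁.Nodup) (hs : l₁ ⊆ l₂) :
    l₁.length ≤ l₂.length := by
  classical
  calc l₁.length = l₁.toFinset.card := (List.toFinset_card_of_nodup h1).symm
    _ ≤ l₂.toFinset.card := Finset.card_le_card (fun x hx => List.mem_toFinset.2 (hs (List.mem_toFinset.1 hx)))
    _ ≤ l₂.length := l₂.toFinset_card_le

lemma pvSubset_of_len_eq {l₁ l₂ : List (Int × Int)} (h1 : l₁.Nodup) (h2 : l₂.Nodup)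
    (hs : l₁ ⊆ l₂) (hl : l₁.length = l₂.length) : l₂ ⊆ l₁ := by
  classical
  have hfs : l₁.toFinset ⊆ l₂.toFinset := fun x hx => List.mem_toFinset.2 (hs (List.mem_toFinset.1 hx))
  have hcard : l₂.toFinset.card ≤ l₁.toFinset.card := by
    rw [List.toFinset_card_of_nodup h1, List.toFinset_card_of_nodup h2, hl]
  have := Finset.eq_of_subset_of_card_le hfs hcard
  intro x hx
  exact List.mem_toFinset.1 (this ▸ List.mem_toFinset.2 hx)

-- the fixpoint loop returns true iff every pixel is reachable from the seed
lemma pvConnLoop_spec (px : List (Int × Int)) (s : Int × Int) (hpx : px.Nodup) :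
    ∀ (fuel : Nat) (seen : List (Int × Int)), seen.Nodup → seen ⊆ px → s ∈ seen →
      (∀ p ∈ seen, pvReach px s p) →
      px.length < fuel + seen.length →
      (pvConnLoop px fuel seen = true ↔ ∀ q ∈ px, pvReach px s q) := by
  intro fuel
  induction fuel with
  | zero =>
      intro seen hnd hsub _ _ hbound
      exfalso
      have := pvLen_le_of_nodup_subset hnd hsub
      omega
  | succ fuel ih =>
      intro seen hnd hsub hsmem hsound hbound
      simp only [pvConnLoop]
      by_cases hg : (pvGrown px seen).isEmpty
      · -- fixpoint: seen is closed under adjacency within px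
        rw [if_pos hg]
        have hgnil : pvGrown px seen = [] := List.isEmpty_iff.1 hg
        have hclosed : ∀ q ∈ px, pvReach px s q → q ∈ seen := by
          intro q hq hr
          clear hq
          induction hr with
          | refl => exact hsmem
          | @tail p q hsp hpq ihp =>
              by_cases hqs : q ∈ seen
              · exact hqs
              · exfalso
                have : q ∈ pvGrown px seen := (pvGrown_mem px seen q).2
                  ⟨hpq.1, hqs, p, ihp, pvNear_of_adj hpq.2⟩
                rw [hgnil] at this
                exact absurd this List.not_mem_nil
        constructor
        · intro hlen q hq
          have hlen' : seen.length = px.length := by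
            simpa using hlen
          have : q ∈ seen := pvSubset_of_len_eq hnd hpx hsub hlen' hq
          exact hsound q this
        · intro hall
          have hpxsub : px ⊆ seen := fun q hq => hclosed q hq (hall q hq)
          have h1 := pvLen_le_of_nodup_subset hnd hsub
          have h2 := pvLen_le_of_nodup_subset hpx hpxsub
          simp only [beq_iff_eq]
          omega
      · rw [if_neg hg]
        have hgne : pvGrown px seen ≠ [] := fun h => hg (by simp [h])
        have hgsub : pvGrown px seen ⊆ px := fun q hq => ((pvGrown_mem px seen q).1 hq).1
        have hgnd : (pvGrown px seen).Nodup := List.Nodup.filter _ hpx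
        have hdisj : ∀ q ∈ pvGrown px seen, q ∉ seen :=
          fun q hq => ((pvGrown_mem px seen q).1 hq).2.1
        apply ih
        · rw [List.nodup_append]
          refine ⟨hnd, hgnd, ?_⟩
          intro a ha b hb hab
          exact hdisj b hb (hab ▸ ha)
        · intro q hq
          rcases List.mem_append.1 hq with h | h
          · exact hsub h
          · exact hgsub h
        · exact List.mem_append.2 (Or.inl hsmem)
        · intro q hq
          rcases List.mem_append.1 hq with h | h
          · exact hsound q h
          · obtain ⟨hqpx, hqns, p, hp, hnear⟩ := (pvGrown_mem px seen q).1 h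
            have hqnp : q ≠ p := fun hqp => hqns (hqp ▸ hp)
            exact (hsound p hp).tail ⟨hqpx, pvAdj_of_near hnear hqnp⟩
        · have : 1 ≤ (pvGrown px seen).length := List.length_pos_of_ne_nil hgne
          rw [List.length_append]
          omega

-- B's connectivity test agrees with "all pixels reachable from the head"
lemma pvIsConnected_char (s : Int × Int) (rest : List (Int × Int))
    (hnd : (s :: rest).Nodup) :
    (pvIsConnected (s :: rest) = true ↔ ∀ q ∈ s :: rest, pvReach (s :: rest) s q) := by
  show pvConnLoop (s :: rest) ((s :: rest).length + 1) [s] = true ↔ _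
  apply pvConnLoop_spec (s :: rest) s hnd
  · exact List.nodup_singleton s
  · intro q hq; rcases List.mem_singleton.1 hq with rfl; exact List.mem_cons_self
  · exact List.mem_singleton.2 rfl
  · intro p hp; rcases List.mem_singleton.1 hp with rfl; exact Relation.ReflTransGen.refl
  · simp

-- the per-feature steps of the two folds agree on every Nodup pixel list
lemma pvStep_eq (clipped_features : List Int) (pr : Int × List (Int × Int))
    (hnd : pr.2.Nodup) (fragmented : Int) :
    (if pr.2 = [] ∨ pr.1 ∈ clipped_features then fragmented
     else if 1 < pvSparseCount pr.2 then fragmented + 1 else fragmented)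
    = (if pr.2 = [] ∨ pr.1 ∈ clipped_features then fragmented
       else if !(pvIsConnected pr.2) then fragmented + 1 else fragmented) := by
  by_cases hskip : pr.2 = [] ∨ pr.1 ∈ clipped_features
  · rw [if_pos hskip, if_pos hskip]
  · rw [if_neg hskip, if_neg hskip]
    rcases hpx : pr.2 with _ | ⟨s, rest⟩
    · exact absurd (Or.inl hpx) hskip
    · rw [hpx] at hnd
      have hA := pvSparseCount_char s rest hnd
      have hB := pvIsConnected_char s rest hnd
      by_cases hconn : ∀ q ∈ s :: rest, pvReach (s :: rest) s q
      · have h1 : ¬ 1 < pvSparseCount (s :: rest) := by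
          rw [hA]; exact fun h => h hconn
        have h2 : ¬ ((!(pvIsConnected (s :: rest))) = true) := by
          intro h
          rw [hB.2 hconn] at h
          simp at h
        rw [if_neg h1, if_neg h2]
      · have h1 : 1 < pvSparseCount (s :: rest) := hA.2 hconn
        have h2 : (!(pvIsConnected (s :: rest))) = true := by
          cases hc : pvIsConnected (s :: rest)
          · simp
          · exact absurd (hB.1 hc) hconn
        rw [if_pos h1, if_pos h2]

-- ===== VERDICT (by name: the statement is the Claim_ definition above) =====
theorem count_fragmented_features_py_spec : Claim_equal_count_fragmented_features_py := by
  intro feature_pixels clipped_features _ hpre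
  unfold Spec_count_fragmented_features_py
  unfold count_fragmented_features_py count_fragmented_features_py_alt
  apply PySem.List.foldl_congr_mem
  intro fragmented pr hpr
  exact pvStep_eq clipped_features pr (hpre pr hpr) fragmented
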